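-- pv_equiv track=rewrite | github.com/egaeus/training | python3/CF1208B.py | check
-- ===== SOURCE A (Python) =====
-- def check(arr, k):
--   dictionary = {}
--   for i in range(len(arr) - k):
--     if arr[i] in dictionary:
--       dictionary[arr[i]] += 1
--     else:
--       dictionary[arr[i]] = 1
--   if len(dictionary) == len(arr) - k:
--     return True
--   for i in range(len(arr) - k):
--     delete = len(arr) - k - i - 1
--     add = len(arr) - 1 - i
--     dictionary[arr[delete]] -= 1
--     if dictionary[arr[delete]] == 0:
--       del dictionary[arr[delete]]
--     if arr[add] in dictionary:
--       dictionary[arr[add]] += 1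
--     else:
--       dictionary[arr[add]] = 1
--     if len(dictionary) == len(arr) - k:
--       return True
--   return False
-- ===== SOURCE B (Python) =====
-- def check(arr, k):
--     n = len(arr)
--     for start in range(n - k + 1):
--         rest = arr[:start] + arr[start + k:]
--         if len(set(rest)) == len(rest):
--             return True
--     return False
-- ===== Notes on version B (the rewrite author's own statement) =====
-- stated objective: simpler
-- what changed: Replaces the incremental sliding-window count dictionary (build counts of the first window, then decrement/delete and increment per shift with early return) by a naive per-window scan: for each start, build the remaining list arr[:start]+arr[start+k:] by slicing and test distinctness with len(set(rest))==len(rest).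
import Mathlib
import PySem

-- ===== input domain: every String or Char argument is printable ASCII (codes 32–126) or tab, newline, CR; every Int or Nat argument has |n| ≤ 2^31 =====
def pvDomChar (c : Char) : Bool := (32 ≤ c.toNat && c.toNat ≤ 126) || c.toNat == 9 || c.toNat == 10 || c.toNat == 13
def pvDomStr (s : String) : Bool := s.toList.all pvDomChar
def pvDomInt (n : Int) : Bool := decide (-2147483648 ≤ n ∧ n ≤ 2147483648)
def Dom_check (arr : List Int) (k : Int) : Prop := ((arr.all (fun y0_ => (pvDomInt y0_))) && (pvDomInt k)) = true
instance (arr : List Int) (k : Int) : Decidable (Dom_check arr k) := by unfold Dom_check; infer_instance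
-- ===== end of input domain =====

-- B replaces A's incremental sliding-window count dictionary by a naive per-window
-- slice-and-set distinctness scan (simpler decomposition, not faster).

-- ===== PORT A =====
-- one iteration of A's second loop: decrement/delete the leaving element, add the
-- entering one, then test len(dictionary) == len(arr) - k; the Bool flag carries
-- Python's early 'return True' (once true, later iterations do not run)
def checkStep (arr : List Int) (n k : Int) (st : Bool × PySem.Dict Int Int) (i : Int) :
    Bool × PySem.Dict Int Int :=
  if st.1 then st else
    -- Python's 'dictionary[arr[delete]] -= 1' needs the key present (else KeyError);
    -- under Pre_check the leaving element is always counted by the dict, so the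
    -- getD-based decrement is exact there
    let del := PySem.List.pyGetD arr (n - k - i - 1) 0
    let d1 := st.2.insert del (st.2.getD del 0 - 1)
    let d2 := if d1.getD del 0 = 0 then d1.erase del else d1
    let a := PySem.List.pyGetD arr (n - 1 - i) 0
    let d3 := if d2.contains a then d2.insert a (d2.getD a 0 + 1) else d2.insert a 1
    if (d3.size : Int) = n - k then (true, d3) else (false, d3)

def check (arr : List Int) (k : Int) : Bool :=
  let n : Int := arr.length
  let d0 : PySem.Dict Int Int :=
    (PySem.List.pyRange 0 (n - k) 1).foldl (fun d i =>
      let x := PySem.List.pyGetD arr i 0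
      if d.contains x then d.insert x (d.getD x 0 + 1) else d.insert x 1) PySem.Dict.empty
  if (d0.size : Int) = n - k then true
  else ((PySem.List.pyRange 0 (n - k) 1).foldl (checkStep arr n k) (false, d0)).1

-- ===== PORT B =====
def check_alt (arr : List Int) (k : Int) : Bool :=
  let n : Int := arr.length
  (PySem.List.pyRange 0 (n - k + 1) 1).any (fun start =>
    (PySem.Set.ofList (PySem.List.slice arr none (some start) ++
        PySem.List.slice arr (some (start + k)) none)).length ==
      (PySem.List.slice arr none (some start) ++
        PySem.List.slice arr (some (start + k)) none).length)

-- ===== PRECONDITION & SPEC =====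
-- Pre_check excludes exactly k < 0: there the Python A raises IndexError
-- (its first loop runs past the end of arr).
def Pre_check (arr : List Int) (k : Int) : Prop := 0 ≤ k
instance (arr : List Int) (k : Int) : Decidable (Pre_check arr k) := by unfold Pre_check; infer_instance
def pvWitness_check : List Int × Int := ([1, 2, 2, 3], 1)
def Spec_check (arr : List Int) (k : Int) (out : Bool) : Prop := out = check_alt arr k
instance (arr : List Int) (k : Int) (out : Bool) : Decidable (Spec_check arr k out) := by unfold Spec_check; infer_instance

-- ===== CLAIM (what is proved, stated in full; the proofs are below) =====
def Claim_equal_check : Prop := ∀ (arr : List Int) (k : Int), Dom_check arr k → Pre_check arr k → Spec_check arr k (check arr k)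

-- ===== LEMMAS AND PROOFS =====

-- the window of elements that remain after removing the k consecutive entries
-- starting at position s
def wnd (arr : List Int) (kn s : Nat) : List Int := arr.take s ++ arr.drop (s + kn)

-- "window s is duplicate-free", phrased exactly as B tests it
abbrev PW (arr : List Int) (kn s : Nat) : Prop :=
  (PySem.Set.ofList (wnd arr kn s)).length = (wnd arr kn s).length

-- invariant for A's dictionary: nodup keys, values = multiplicities in window s,
-- keys = elements of window s
def DInv (arr : List Int) (kn : Nat) (d : PySem.Dict Int Int) (s : Nat) : Prop :=
  d.keys.Nodup ∧ ∀ v, d.getD v 0 = ((wnd arr kn s).count v : Int) ∧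
    (d.contains v = true ↔ 0 < (wnd arr kn s).count v)

theorem size_of_inv (arr : List Int) (kn : Nat) (d : PySem.Dict Int Int) (s : Nat)
    (h : DInv arr kn d s) : d.size = (PySem.Set.ofList (wnd arr kn s)).length := by
  have hperm : d.keys.Perm (PySem.Set.ofList (wnd arr kn s)) := by
    rw [List.perm_ext_iff_of_nodup h.1 (PySem.Set.nodup_ofList _)]
    intro v
    rw [PySem.Set.mem_ofList, ← PySem.Dict.contains_iff_mem_keys, (h.2 v).2,
      List.count_pos_iff]
  calc d.size = d.keys.length := by simp [PySem.Dict.size, PySem.Dict.keys]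
  _ = _ := hperm.length_eq

theorem length_wnd (arr : List Int) (kn s : Nat) (hs : s + kn ≤ arr.length) :
    (wnd arr kn s).length = arr.length - kn := by
  simp [wnd]; omega

theorem count_wnd_succ (arr : List Int) (kn s : Nat) (h : s + kn < arr.length) (v : Int) :
    ((wnd arr kn s).count v : Int) =
      (wnd arr kn (s + 1)).count v - (if v = arr.getD s 0 then 1 else 0)
        + (if v = arr.getD (s + kn) 0 then 1 else 0) := by
  have h1 : s < arr.length := by omega
  have e1 : arr.take (s+1) = arr.take s ++ [arr[s]] := by
    rw [List.take_succ]; simp [List.getElem?_eq_getElem h1]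
  have e2 : arr.drop (s+kn) = arr[s+kn] :: arr.drop (s+1+kn) := by
    rw [List.drop_eq_getElem_cons h]
    rw [show s+kn+1 = s+1+kn by omega]
  have g1 : arr.getD s 0 = arr[s] := List.getD_eq_getElem arr 0 h1
  have g2 : arr.getD (s+kn) 0 = arr[s+kn] := List.getD_eq_getElem arr 0 h
  simp only [wnd, e1, e2, List.count_append, List.count_cons, List.count_singleton,
    g1, g2]
  push_cast
  split_ifs <;> simp_all <;> omega

theorem getD_erase {ν : Type} (d : PySem.Dict Int ν) (x v : Int) (d0 : ν) :
    (d.erase x).getD v d0 = if v = x then d0 else d.getD v d0 := by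
  obtain ⟨l⟩ := d
  simp only [PySem.Dict.getD, PySem.Dict.get?, PySem.Dict.erase]
  induction l with
  | nil => simp
  | cons p t ih =>
    by_cases hpx : p.1 = x <;> by_cases hpv : p.1 = v <;> simp_all

theorem contains_erase {ν : Type} (d : PySem.Dict Int ν) (x v : Int) :
    (d.erase x).contains v = if v = x then false else d.contains v := by
  obtain ⟨l⟩ := d
  by_cases hvx : v = x
  · subst hvx
    simp only [PySem.Dict.contains, PySem.Dict.erase, List.any_filter, if_pos rfl]
    simp
  · simp only [PySem.Dict.contains, PySem.Dict.erase, List.any_filter, if_neg hvx]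
    apply PySem.List.any_congr_mem
    intro a _
    by_cases h1 : a.1 = v <;> simp_all

theorem nodup_keys_erase {ν : Type} (d : PySem.Dict Int ν) (x : Int)
    (h : d.keys.Nodup) : (d.erase x).keys.Nodup := by
  obtain ⟨l⟩ := d
  simp only [PySem.Dict.keys, PySem.Dict.erase] at *
  exact h.sublist (List.Sublist.map _ (List.filter_sublist))



-- the decrement/delete half of A's shift step, on an abstract count function

theorem dict_dec (d : PySem.Dict Int Int) (x : Int) (cnt : Int → Int)
    (hnd : d.keys.Nodup)
    (hg : ∀ v, d.getD v 0 = cnt v)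
    (hc : ∀ v, d.contains v = true ↔ 0 < cnt v)
    (hnn : ∀ v, 0 ≤ cnt v) (hx : 0 < cnt x) :
    ((if (d.insert x (d.getD x 0 - 1)).getD x 0 = 0
        then (d.insert x (d.getD x 0 - 1)).erase x
        else d.insert x (d.getD x 0 - 1)).keys.Nodup) ∧
    (∀ v, (if (d.insert x (d.getD x 0 - 1)).getD x 0 = 0
        then (d.insert x (d.getD x 0 - 1)).erase x
        else d.insert x (d.getD x 0 - 1)).getD v 0 = cnt v - (if v = x then 1 else 0)) ∧
    (∀ v, (if (d.insert x (d.getD x 0 - 1)).getD x 0 = 0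
        then (d.insert x (d.getD x 0 - 1)).erase x
        else d.insert x (d.getD x 0 - 1)).contains v = true
      ↔ 0 < cnt v - (if v = x then 1 else 0)) := by
  have hg1 : ∀ v, (d.insert x (d.getD x 0 - 1)).getD v 0 =
      if v = x then cnt x - 1 else cnt v := by
    intro v
    rw [PySem.Dict.getD_insert, hg x]
    split_ifs <;> simp [hg v]
  have hc1 : ∀ v, (d.insert x (d.getD x 0 - 1)).contains v = true ↔
      (v = x ∨ 0 < cnt v) := by
    intro v
    rw [PySem.Dict.contains_insert, Bool.or_eq_true_iff, hc v]
    simp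
  refine ⟨?_, ?_, ?_⟩
  · split_ifs
    · exact nodup_keys_erase _ _ (PySem.Dict.nodup_keys_insert _ _ _ hnd)
    · exact PySem.Dict.nodup_keys_insert _ _ _ hnd
  · intro v
    by_cases hv : v = x
    · subst hv
      rw [if_pos rfl]
      split_ifs with h0 <;> rw [hg1 v, if_pos rfl] at h0
      · rw [getD_erase, if_pos rfl]; omega
      · rw [hg1 v, if_pos rfl]
    · rw [if_neg hv, sub_zero]
      split_ifs with h0
      · rw [getD_erase, if_neg hv, hg1 v, if_neg hv]
      · rw [hg1 v, if_neg hv]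
  · intro v
    have hnnv := hnn v
    by_cases hv : v = x
    · subst hv
      rw [if_pos rfl]
      split_ifs with h0 <;> rw [hg1 v, if_pos rfl] at h0
      · rw [contains_erase, if_pos rfl]
        simp only [Bool.false_eq_true, false_iff]
        omega
      · rw [hc1 v]
        constructor
        · intro _; omega
        · intro _; left; rfl
    · rw [if_neg hv, sub_zero]
      split_ifs with h0
      · rw [contains_erase, if_neg hv, hc1 v]
        constructor
        · rintro (h1 | h1)
          · exact absurd h1 hv
          · exact h1
        · intro h1; right; exact h1
      · rw [hc1 v]
        constructor
        · rintro (h1 | h1)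
          · exact absurd h1 hv
          · exact h1
        · intro h1; right; exact h1

-- the add half of A's shift step, on an abstract count function

theorem dict_add (d : PySem.Dict Int Int) (y : Int) (cnt : Int → Int)
    (hnd : d.keys.Nodup)
    (hg : ∀ v, d.getD v 0 = cnt v)
    (hc : ∀ v, d.contains v = true ↔ 0 < cnt v)
    (hnn : ∀ v, 0 ≤ cnt v) :
    ((if d.contains y then d.insert y (d.getD y 0 + 1) else d.insert y 1).keys.Nodup) ∧
    (∀ v, (if d.contains y then d.insert y (d.getD y 0 + 1) else d.insert y 1).getD v 0
        = cnt v + (if v = y then 1 else 0)) ∧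
    (∀ v, (if d.contains y then d.insert y (d.getD y 0 + 1) else d.insert y 1).contains v = true
        ↔ 0 < cnt v + (if v = y then 1 else 0)) := by
  have hy0 : d.contains y = false → cnt y = 0 := by
    intro hcy
    have h1 := hc y
    have h2 := hnn y
    rw [hcy] at h1
    simp only [Bool.false_eq_true, false_iff] at h1
    omega
  refine ⟨?_, ?_, ?_⟩
  · split_ifs <;> exact PySem.Dict.nodup_keys_insert _ _ _ hnd
  · intro v
    by_cases hv : v = y
    · subst hv
      rw [if_pos rfl]
      split_ifs with hcy
      · rw [PySem.Dict.getD_insert, if_pos rfl, hg v]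
      · rw [PySem.Dict.getD_insert, if_pos rfl,
          hy0 (by simpa using hcy)]
        omega
    · rw [if_neg hv, add_zero]
      split_ifs with hcy <;> rw [PySem.Dict.getD_insert, if_neg hv, hg v]
  · intro v
    have hnnv := hnn v
    by_cases hv : v = y
    · subst hv
      rw [if_pos rfl]
      split_ifs with hcy <;>
        rw [PySem.Dict.contains_insert, Bool.or_eq_true_iff] <;>
        constructor
      · intro _; omega
      · intro _; left; simp
      · intro _; omega
      · intro _; left; simp
    · rw [if_neg hv, add_zero]
      split_ifs with hcy <;>
        simp only [PySem.Dict.contains_insert, Bool.or_eq_true_iff, hc v,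
          beq_iff_eq, decide_eq_true_eq, hv, false_or]

theorem inv_step (arr : List Int) (kn s : Nat) (d : PySem.Dict Int Int)
    (h : DInv arr kn d (s + 1)) (hs : s + 1 + kn ≤ arr.length) :
    DInv arr kn
      (let del := arr.getD s 0
       let d1 := PySem.Dict.insert d del (d.getD del 0 - 1)
       let d2 := if d1.getD del 0 = 0 then d1.erase del else d1
       let a := arr.getD (s + kn) 0
       if d2.contains a then d2.insert a (d2.getD a 0 + 1) else d2.insert a 1) s := by
  obtain ⟨hnd, hf⟩ := h
  have hskn : s + kn < arr.length := by omega
  have hs1 : s < arr.length := by omega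
  have hxmem : arr.getD s 0 ∈ wnd arr kn (s + 1) := by
    have e1 : arr.take (s+1) = arr.take s ++ [arr[s]] := by
      rw [List.take_add_one]; simp [List.getElem?_eq_getElem hs1]
    have h2 : arr.getD s 0 ∈ arr.take (s+1) := by
      rw [List.getD_eq_getElem arr 0 hs1, e1]
      exact List.mem_append_right _ (List.mem_singleton_self _)
    unfold wnd
    rw [List.mem_append]
    exact Or.inl h2
  have hxc : 0 < ((wnd arr kn (s+1)).count (arr.getD s 0) : Int) := by
    exact_mod_cast List.count_pos_iff.2 hxmem
  have hnn : ∀ v, (0:Int) ≤ ((wnd arr kn (s+1)).count v : Int) :=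
    fun v => Int.natCast_nonneg _
  have hcI : ∀ v, d.contains v = true ↔ 0 < ((wnd arr kn (s+1)).count v : Int) := by
    intro v
    rw [(hf v).2]
    exact ⟨fun t => by exact_mod_cast t, fun t => by exact_mod_cast t⟩
  obtain ⟨hnd2, hg2, hc2⟩ := dict_dec d (arr.getD s 0)
    (fun v => ((wnd arr kn (s+1)).count v : Int)) hnd
    (fun v => (hf v).1) hcI hnn hxc
  have hnn2 : ∀ v, (0:Int) ≤ ((wnd arr kn (s+1)).count v : Int)
      - (if v = arr.getD s 0 then 1 else 0) := by
    intro v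
    by_cases hv : v = arr.getD s 0
    · rw [if_pos hv, hv]; omega
    · rw [if_neg hv, sub_zero]; exact hnn v
  obtain ⟨hnd3, hg3, hc3⟩ := dict_add _ (arr.getD (s + kn) 0)
    (fun v => ((wnd arr kn (s+1)).count v : Int) - (if v = arr.getD s 0 then 1 else 0)) hnd2
    hg2 hc2 hnn2
  refine ⟨hnd3, fun v => ⟨?_, ?_⟩⟩
  · dsimp only
    rw [hg3 v, count_wnd_succ arr kn s hskn v]
  · dsimp only
    rw [hc3 v, ← count_wnd_succ arr kn s hskn v]
    exact ⟨fun t => by exact_mod_cast t, fun t => by exact_mod_cast t⟩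

theorem foldl_checkStep_true (arr : List Int) (n k : Int) (l : List Int)
    (d : PySem.Dict Int Int) : l.foldl (checkStep arr n k) (true, d) = (true, d) := by
  induction l with
  | nil => rfl
  | cons a t ih => rw [List.foldl_cons, show checkStep arr n k (true, d) a = (true, d) from rfl, ih]

theorem loop_sem (arr : List Int) (k : Int) (hk : 0 ≤ k) (hkn : k.toNat ≤ arr.length) :
    ∀ (s : Nat) (d : PySem.Dict Int Int), s ≤ arr.length - k.toNat →
      DInv arr k.toNat d s →
      ((PySem.List.pyRange (((arr.length - k.toNat : Nat) : Int) - s)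
          ((arr.length - k.toNat : Nat) : Int) 1).foldl
        (checkStep arr arr.length k) (false, d)).1
        = decide (∃ t, t < s ∧ PW arr k.toNat t) := by
  intro s
  induction s with
  | zero =>
    intro d _ _
    rw [Nat.cast_zero, sub_zero, PySem.List.pyRange_one_eq_nil (le_refl _)]
    simp
  | succ s ih =>
    intro d hle hinv
    rw [show ((s+1 : Nat) : Int) = ((s : Nat) : Int) + 1 by push_cast; ring]
    have hkc : (k.toNat : Int) = k := Int.toNat_of_nonneg hk
    have hm : ((arr.length - k.toNat : Nat) : Int) = (arr.length : Int) - k := by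
      push_cast [Nat.cast_sub hkn, hkc]; ring
    have hcons : PySem.List.pyRange (((arr.length - k.toNat : Nat) : Int) - (((s : Nat) : Int)+1))
        ((arr.length - k.toNat : Nat) : Int) 1
        = (((arr.length - k.toNat : Nat) : Int) - (((s : Nat) : Int)+1)) ::
          PySem.List.pyRange (((arr.length - k.toNat : Nat) : Int) - s)
            ((arr.length - k.toNat : Nat) : Int) 1 := by
      rw [PySem.List.pyRange_one_cons (by omega)]
      congr 1
      ring_nf
    have hidel : (arr.length : Int) - k - (((arr.length - k.toNat : Nat) : Int) - (((s : Nat) : Int)+1)) - 1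
        = ((s : Nat) : Int) := by
      rw [hm]; push_cast; ring
    have hiadd : (arr.length : Int) - 1 - (((arr.length - k.toNat : Nat) : Int) - (((s : Nat) : Int)+1))
        = ((s + k.toNat : Nat) : Int) := by
      rw [hm]; push_cast [hkc]; ring
    have hs1 : s < arr.length := by omega
    have hskn : s + k.toNat < arr.length := by omega
    have hstep : checkStep arr arr.length k (false, d)
        (((arr.length - k.toNat : Nat) : Int) - (((s : Nat) : Int)+1))
        = (let del := arr.getD s 0
           let d1 := PySem.Dict.insert d del (d.getD del 0 - 1)
           let d2 := if d1.getD del 0 = 0 then d1.erase del else d1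
           let a := arr.getD (s + k.toNat) 0
           let d3 := if d2.contains a then d2.insert a (d2.getD a 0 + 1) else d2.insert a 1
           if (d3.size : Int) = (arr.length : Int) - k then (true, d3) else (false, d3)) := by
      simp only [checkStep, hidel, hiadd, PySem.List.pyGetD_natCast]
      rfl
    have hinv3 : DInv arr k.toNat
        (let del := arr.getD s 0
         let d1 := PySem.Dict.insert d del (d.getD del 0 - 1)
         let d2 := if d1.getD del 0 = 0 then d1.erase del else d1
         let a := arr.getD (s + k.toNat) 0
         if d2.contains a then d2.insert a (d2.getD a 0 + 1) else d2.insert a 1) s :=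
      inv_step arr k.toNat s d hinv (by omega)
    have hlen : (wnd arr k.toNat s).length = arr.length - k.toNat :=
      length_wnd arr k.toNat s (by omega)
    have hcond : (((let del := arr.getD s 0
         let d1 := PySem.Dict.insert d del (d.getD del 0 - 1)
         let d2 := if d1.getD del 0 = 0 then d1.erase del else d1
         let a := arr.getD (s + k.toNat) 0
         if d2.contains a then d2.insert a (d2.getD a 0 + 1) else d2.insert a 1).size : Int)
          = (arr.length : Int) - k) ↔ PW arr k.toNat s := by
      rw [size_of_inv arr k.toNat _ s hinv3, ← hm, PW, hlen]
      exact ⟨fun t => by exact_mod_cast t, fun t => by exact_mod_cast t⟩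
    rw [hcons, List.foldl_cons, hstep]
    by_cases hPW : PW arr k.toNat s
    · rw [if_pos (hcond.2 hPW), foldl_checkStep_true]
      exact (decide_eq_true (⟨s, by omega, hPW⟩ : ∃ t, t < s + 1 ∧ PW arr k.toNat t)).symm
    · rw [if_neg (fun hc => hPW (hcond.1 hc))]
      rw [ih _ (by omega) hinv3]
      rw [decide_eq_decide]
      constructor
      · rintro ⟨t, ht, hp⟩; exact ⟨t, by omega, hp⟩
      · rintro ⟨t, ht, hp⟩
        refine ⟨t, ?_, hp⟩
        rcases Nat.lt_succ_iff_lt_or_eq.1 ht with h1 | h1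
        · exact h1
        · subst h1; exact absurd hp hPW

theorem check_eq (arr : List Int) (k : Int) (hk : 0 ≤ k) (hkn : k.toNat ≤ arr.length) :
    check arr k = decide (∃ t, t < arr.length - k.toNat + 1 ∧ PW arr k.toNat t) := by
  have hkc : (k.toNat : Int) = k := Int.toNat_of_nonneg hk
  have hm : ((arr.length - k.toNat : Nat) : Int) = (arr.length : Int) - k := by
    push_cast [Nat.cast_sub hkn, hkc]; ring
  have hlen : (arr.take (arr.length - k.toNat)).length = arr.length - k.toNat := by
    rw [List.length_take]; omega
  have hwm : wnd arr k.toNat (arr.length - k.toNat) = arr.take (arr.length - k.toNat) := by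
    unfold wnd
    rw [show arr.length - k.toNat + k.toNat = arr.length by omega, List.drop_length,
      List.append_nil]
  -- the first loop is the counter of the first window
  have hd0 : (PySem.List.pyRange 0 ((arr.length : Int) - k) 1).foldl (fun d i =>
      let x := PySem.List.pyGetD arr i 0
      if d.contains x then d.insert x (d.getD x 0 + 1) else d.insert x 1) PySem.Dict.empty
      = PySem.Dict.counter (arr.take (arr.length - k.toNat)) := by
    rw [PySem.List.foldl_congr_mem _ _
      (fun d i => d.insert (PySem.List.pyGetD (arr.take (arr.length - k.toNat)) i 0)
        ((d.getD (PySem.List.pyGetD (arr.take (arr.length - k.toNat)) i 0) 0) + 1)) _ ?_]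
    · rw [show ((arr.length : Int) - k) = ((arr.take (arr.length - k.toNat)).length : Int) by
        rw [hlen, hm]]
      exact (PySem.List.foldl_pyRange_zero_pyGetD' (arr.take (arr.length - k.toNat)) 0
        (fun (d : PySem.Dict Int Int) x => d.insert x (d.getD x 0 + 1))
        PySem.Dict.empty).trans
        (PySem.Dict.foldl_insert_getD_add_one_eq_counter _)
    · intro d i hi
      rw [PySem.List.mem_pyRange_one] at hi
      have hi2 : i < ((arr.take (arr.length - k.toNat)).length : Int) := by
        rw [hlen, hm]; exact hi.2
      have hget : PySem.List.pyGetD arr i 0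
          = PySem.List.pyGetD (arr.take (arr.length - k.toNat)) i 0 := by
        rw [PySem.List.pyGetD_eq_getElem arr 0 hi.1 (by omega),
          PySem.List.pyGetD_eq_getElem _ 0 hi.1 hi2]
        exact (List.getElem_take).symm
      dsimp only
      rw [hget]
      by_cases hc : (d.contains (PySem.List.pyGetD (arr.take (arr.length - k.toNat)) i 0)) = true
      · rw [if_pos hc]
      · rw [if_neg hc, PySem.Dict.getD_of_not_contains _ _ (by simpa using hc)]
        norm_num
  have hinv0 : DInv arr k.toNat (PySem.Dict.counter (arr.take (arr.length - k.toNat)))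
      (arr.length - k.toNat) := by
    refine ⟨PySem.Dict.nodup_keys_counter _, fun v => ⟨?_, ?_⟩⟩
    · rw [PySem.Dict.getD_counter, hwm]
    · rw [PySem.Dict.contains_counter, hwm, List.contains_iff]
      exact List.count_pos_iff.symm
  have hcond0 : (((PySem.Dict.counter (arr.take (arr.length - k.toNat))).size : Int)
      = (arr.length : Int) - k) ↔ PW arr k.toNat (arr.length - k.toNat) := by
    rw [size_of_inv arr k.toNat _ _ hinv0, ← hm, PW, hwm, hlen]
    exact ⟨fun t => by exact_mod_cast t, fun t => by exact_mod_cast t⟩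
  show (if _ = (arr.length : Int) - k then true
    else ((PySem.List.pyRange 0 ((arr.length : Int) - k) 1).foldl
      (checkStep arr arr.length k) (false, _)).1) = _
  rw [hd0]
  by_cases hPW : PW arr k.toNat (arr.length - k.toNat)
  · rw [if_pos (hcond0.2 hPW)]
    exact (decide_eq_true ⟨arr.length - k.toNat, by omega, hPW⟩).symm
  · rw [if_neg (fun hc => hPW (hcond0.1 hc))]
    have := loop_sem arr k hk hkn (arr.length - k.toNat)
      (PySem.Dict.counter (arr.take (arr.length - k.toNat))) (le_refl _) hinv0
    rw [sub_self] at this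
    rw [← hm, this, decide_eq_decide]
    constructor
    · rintro ⟨t, ht, hp⟩; exact ⟨t, by omega, hp⟩
    · rintro ⟨t, ht, hp⟩
      refine ⟨t, ?_, hp⟩
      rcases Nat.lt_succ_iff_lt_or_eq.1 ht with h1 | h1
      · exact h1
      · subst h1; exact absurd hp hPW

theorem check_alt_eq (arr : List Int) (k : Int) (hk : 0 ≤ k) (hkn : k.toNat ≤ arr.length) :
    check_alt arr k = decide (∃ t, t < arr.length - k.toNat + 1 ∧ PW arr k.toNat t) := by
  have hkc : (k.toNat : Int) = k := Int.toNat_of_nonneg hk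
  have hm1 : (arr.length : Int) - k + 1 = ((arr.length - k.toNat + 1 : Nat) : Int) := by
    push_cast [Nat.cast_sub hkn, hkc]; ring
  have htest : ∀ j : Nat,
      ((PySem.Set.ofList (PySem.List.slice arr none (some ((0:Int) + (j:Int))) ++
          PySem.List.slice arr (some ((0:Int) + (j:Int) + k)) none)).length ==
        (PySem.List.slice arr none (some ((0:Int) + (j:Int))) ++
          PySem.List.slice arr (some ((0:Int) + (j:Int) + k)) none).length)
        = decide (PW arr k.toNat j) := by
    intro j
    rw [zero_add, PySem.List.slice_to_natCast,
      show ((j : Nat) : Int) + k = ((j + k.toNat : Nat) : Int) by push_cast [hkc]; ring,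
      PySem.List.slice_from_natCast]
    simp only [PW, wnd]
    exact Bool.beq_eq_decide_eq _ _
  show (PySem.List.pyRange 0 ((arr.length : Int) - k + 1) 1).any _ = _
  rw [hm1, PySem.List.pyRange_one, List.any_map]
  simp only [Function.comp_def]
  rw [PySem.List.any_congr_mem (g := fun j => decide (PW arr k.toNat j))
    (fun j _ => htest j)]
  rw [Bool.eq_iff_iff]
  simp only [List.any_eq_true, List.mem_range, decide_eq_true_eq, sub_zero,
    Int.toNat_natCast]

-- ===== VERDICT (by name: the statement is the Claim_ definition above) =====
theorem check_spec : Claim_equal_check := by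
  intro arr k _ hk
  unfold Pre_check at hk
  unfold Spec_check
  by_cases hkn : k.toNat ≤ arr.length
  · rw [check_eq arr k hk hkn, check_alt_eq arr k hk hkn]
  · -- k exceeds len(arr): both programs run no window test and return False
    have hneg : (arr.length : Int) - k < 0 := by omega
    show (if _ then true else _) = _
    rw [PySem.List.pyRange_one_eq_nil (by omega : (arr.length : Int) - k ≤ 0)]
    rw [if_neg (by
      show ¬ (((List.foldl _ PySem.Dict.empty [] : PySem.Dict Int Int).size : Int) = _)
      rw [List.foldl_nil]
      simp only [PySem.Dict.size_empty]
      omega)]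
    rw [List.foldl_nil]
    show false = (PySem.List.pyRange 0 ((arr.length : Int) - k + 1) 1).any _
    rw [PySem.List.pyRange_one_eq_nil (by omega : (arr.length : Int) - k + 1 ≤ 0)]
    rfl
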